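-- pv_equiv track=rewrite | github.com/Gianluca011/ayed1_2025_tps | TP_3/ejercicio_2.py | matriz_f
-- ===== SOURCE A (Python) =====
-- from typing import List
--
-- def matriz_f(n: int) -> List[List[int]]:
--
--     """ Genera una matriz con valores crecientes desde la esquina inferior izquierda
--
--     Pre: n mayor que 0
--
--     Post: devuelve una matriz n por n triangular invertida con valores desde 1 hasta n por n
--
--     """
--
--     assert n > 0
--     val = 1
--     matriz = [[0]*n for _ in range(n)]
--     for i in range(n-1, -1, -1):
--         for j in range(n):
--             if i+j >= n-1:
--                 matriz[i][j] = val
--                 val += 1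
--     return matriz
-- ===== SOURCE B (Python) =====
-- from typing import List
--
-- def matriz_f(n: int) -> List[List[int]]:
--     assert n > 0
--     return [[n*(n+1)//2 - (i+1)*(i+2)//2 + j - n + i + 2 if i + j >= n - 1 else 0
--              for j in range(n)]
--             for i in range(n)]
-- ===== Notes on version B (the rewrite author's own statement) =====
-- stated objective: simpler
-- what changed: Replaces the stateful bottom-up fill with a running counter and in-place assignments by a single double comprehension that computes each cell independently from a closed-form triangular-number formula.
import Mathlib
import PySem

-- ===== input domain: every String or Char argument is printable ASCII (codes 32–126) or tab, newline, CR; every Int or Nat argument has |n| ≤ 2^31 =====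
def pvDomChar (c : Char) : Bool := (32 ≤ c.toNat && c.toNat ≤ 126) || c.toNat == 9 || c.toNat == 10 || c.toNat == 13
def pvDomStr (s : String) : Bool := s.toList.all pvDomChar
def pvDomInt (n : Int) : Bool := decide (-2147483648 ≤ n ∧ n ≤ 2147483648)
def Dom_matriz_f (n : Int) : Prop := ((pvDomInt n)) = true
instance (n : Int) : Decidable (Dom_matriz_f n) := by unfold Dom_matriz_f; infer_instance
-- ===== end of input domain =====

-- B replaces A's stateful bottom-up fill (running counter `val`) by a closed-form value for each
-- cell computed independently in a double comprehension; objective: simpler (no speed claim).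

-- ===== PORT A =====
-- matriz[i][j] = val : i and j are always nonnegative and in range here, so modify/set is exact
def matriz_f (n : Int) : List (List Int) :=
  ((PySem.List.pyRange (n - 1) (-1) (-1)).foldl
    (fun (st : List (List Int) × Int) i =>
      (PySem.List.pyRange 0 n 1).foldl
        (fun (st : List (List Int) × Int) j =>
          if i + j ≥ n - 1 then
            (st.1.modify i.toNat (fun row => row.set j.toNat st.2), st.2 + 1)
          else st) st)
    ((PySem.List.pyRange 0 n 1).map (fun _ => List.replicate n.toNat (0 : Int)), 1)).1

-- ===== PORT B =====
def matriz_f_alt (n : Int) : List (List Int) :=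
  (PySem.List.pyRange 0 n 1).map (fun i =>
    (PySem.List.pyRange 0 n 1).map (fun j =>
      if i + j ≥ n - 1 then
        PySem.Int.floordiv (n * (n + 1)) 2 - PySem.Int.floordiv ((i + 1) * (i + 2)) 2
          + j - n + i + 2
      else 0))

-- ===== PRECONDITION & SPEC =====
-- Pre_: the Python A asserts n > 0 and raises AssertionError otherwise; exactly those inputs are excluded.
def Pre_matriz_f (n : Int) : Prop := 0 < n
instance (n : Int) : Decidable (Pre_matriz_f n) := by unfold Pre_matriz_f; infer_instance
def pvWitness_matriz_f : Int := (3)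
def Spec_matriz_f (n : Int) (out : List (List Int)) : Prop := out = matriz_f_alt n
instance (n : Int) (out : List (List Int)) : Decidable (Spec_matriz_f n out) := by unfold Spec_matriz_f; infer_instance

-- ===== CLAIM (what is proved, stated in full; the proofs are below) =====
def Claim_equal_matriz_f : Prop := ∀ (n : Int), Dom_matriz_f n → Pre_matriz_f n → Spec_matriz_f n (matriz_f n)

-- ===== LEMMAS AND PROOFS =====

-- triangular numbers T k = 1 + 2 + ... + k
def pvT : Nat → Int
  | 0 => 0
  | k + 1 => pvT k + (k + 1)

theorem pvT_eq (k : Nat) : 2 * pvT k = (k : Int) * (k + 1) := by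
  induction k with
  | zero => simp [pvT]
  | succ k ih => simp only [pvT]; push_cast; push_cast at ih; ring_nf; ring_nf at ih; omega

-- value A writes into cell (i, j) (when i+j ≥ m-1): the val counter at that moment
def pvCell (m i j : Nat) : Int :=
  if (i : Int) + (j : Int) ≥ (m : Int) - 1 then
    pvT m - pvT (i + 1) + 1 + ((j : Int) - ((m : Int) - 1 - (i : Int)))
  else 0

def pvRow (m i : Nat) : List Int := (List.range m).map (fun j => pvCell m i j)

-- partial row i after the inner loop has processed j = 0 .. t-1
def pvPRow (m i t : Nat) : List Int :=
  (List.range m).map (fun j => if j < t then pvCell m i j else 0)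

-- number of cells written in row i after processing j = 0 .. t-1
def pvCnt (m i t : Nat) : Int := max 0 ((t : Int) - ((m : Int) - 1 - (i : Int)))

-- matrix state after the outer loop has processed rows m-1 down to k
def pvMat (m k : Nat) : List (List Int) :=
  (List.range m).map (fun i => if i < k then List.replicate m (0 : Int) else pvRow m i)

-- matrix state mid-row: rows < k zero, row k partially filled up to t, rows > k done
def pvMatP (m k t : Nat) : List (List Int) :=
  (List.range m).map (fun i =>
    if i < k then List.replicate m (0 : Int)
    else if i = k then pvPRow m k t else pvRow m i)

theorem map_range_set {α : Type} (m t : Nat) (f : Nat → α) (v : α) (ht : t < m) :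
    ((List.range m).map f).set t v = (List.range m).map (fun j => if j = t then v else f j) := by
  apply List.ext_getElem
  · simp
  · intro k h1 h2
    simp only [List.length_map, List.length_range] at h2
    rw [List.getElem_set]
    simp only [List.getElem_map, List.getElem_range]
    by_cases h : k = t
    · subst h; simp
    · rw [if_neg (fun e => h e.symm), if_neg h]

theorem map_range_modify {α : Type} (m k : Nat) (f : Nat → α) (g : α → α) (hk : k < m) :
    ((List.range m).map f).modify k g
      = (List.range m).map (fun i => if i = k then g (f k) else f i) := by
  apply List.ext_getElem
  · simp
  · intro j h1 h2
    simp only [List.length_map, List.length_range] at h2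
    rw [List.getElem_modify]
    simp only [List.getElem_map, List.getElem_range]
    by_cases h : j = k
    · subst h; simp
    · rw [if_neg (fun e => h e.symm), if_neg h]

-- one step of the inner loop
theorem pv_inner_step (m k t : Nat) (hk : k < m) (ht : t < m) :
    (fun (st : List (List Int) × Int) (j : Int) =>
        if ((k : Int)) + j ≥ (m : Int) - 1 then
          (st.1.modify ((k : Int)).toNat (fun row => row.set j.toNat st.2), st.2 + 1)
        else st)
      (pvMatP m k t, pvT m - pvT (k + 1) + 1 + pvCnt m k t) ((t : Nat) : Int)
    = (pvMatP m k (t + 1), pvT m - pvT (k + 1) + 1 + pvCnt m k (t + 1)) := by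
  dsimp only
  by_cases hcond : ((k : Int)) + (t : Int) ≥ (m : Int) - 1
  · rw [if_pos hcond]
    have hcnt : pvCnt m k t = (t : Int) - ((m : Int) - 1 - (k : Int)) := by
      unfold pvCnt; omega
    have hcnt' : pvCnt m k (t + 1) = pvCnt m k t + 1 := by
      unfold pvCnt; push_cast; omega
    refine Prod.ext ?_ (by simp [hcnt']; ring)
    simp only [Int.toNat_natCast]
    unfold pvMatP
    rw [map_range_modify m k _ _ hk]
    have hfk : (if k < k then List.replicate m (0 : Int)
        else if k = k then pvPRow m k t else pvRow m k) = pvPRow m k t := by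
      rw [if_neg (lt_irrefl k), if_pos rfl]
    rw [hfk]
    apply List.map_congr_left
    intro i hi
    by_cases hik : i = k
    · subst hik
      rw [if_pos rfl, if_neg (lt_irrefl i), if_pos rfl]
      unfold pvPRow
      rw [map_range_set m t _ _ ht]
      apply List.map_congr_left
      intro j hj
      simp only [List.mem_range] at hj
      by_cases hjt : j = t
      · subst hjt
        rw [if_pos rfl, if_pos (Nat.lt_succ_self j)]
        unfold pvCell
        rw [if_pos hcond, hcnt]
      · rw [if_neg hjt]
        by_cases hjlt : j < t
        · rw [if_pos hjlt, if_pos (by omega)]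
        · rw [if_neg hjlt, if_neg (by omega)]
    · rw [if_neg hik]
      by_cases hlt : i < k
      · rw [if_pos hlt, if_pos hlt]
      · rw [if_neg hlt, if_neg hlt, if_neg hik, if_neg hik]
  · rw [if_neg hcond]
    have hcnt' : pvCnt m k (t + 1) = pvCnt m k t := by
      unfold pvCnt; push_cast; omega
    rw [hcnt']
    refine Prod.ext ?_ rfl
    unfold pvMatP
    apply List.map_congr_left
    intro i hi
    by_cases hik : i = k
    · subst hik
      rw [if_neg (by omega : ¬ i < i), if_pos rfl, if_neg (by omega : ¬ i < i), if_pos rfl]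
      unfold pvPRow
      apply List.map_congr_left
      intro j hj
      simp only [List.mem_range] at hj
      by_cases hjt : j = t
      · subst hjt
        rw [if_neg (lt_irrefl j), if_pos (Nat.lt_succ_self j)]
        unfold pvCell
        rw [if_neg hcond]
      · by_cases hjlt : j < t
        · rw [if_pos hjlt, if_pos (by omega)]
        · rw [if_neg hjlt, if_neg (by omega)]
    · by_cases hlt : i < k
      · rw [if_pos hlt, if_pos hlt]
      · rw [if_neg hlt, if_neg hlt, if_neg hik, if_neg hik]

-- the inner loop over j = 0 .. t-1, starting from the state in which rows > k are done
theorem pv_inner (m k : Nat) (hk : k < m) (t : Nat) (ht : t ≤ m) :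
    (PySem.List.pyRange 0 (t : Int) 1).foldl
      (fun (st : List (List Int) × Int) (j : Int) =>
        if ((k : Int)) + j ≥ (m : Int) - 1 then
          (st.1.modify ((k : Int)).toNat (fun row => row.set j.toNat st.2), st.2 + 1)
        else st)
      (pvMatP m k 0, pvT m - pvT (k + 1) + 1)
    = (pvMatP m k t, pvT m - pvT (k + 1) + 1 + pvCnt m k t) := by
  induction t with
  | zero =>
    rw [PySem.List.pyRange_one_eq_nil (by norm_num)]
    have : pvCnt m k 0 = 0 := by unfold pvCnt; omega
    simp [this]
  | succ t ih =>
    have ht' : t ≤ m := Nat.le_of_succ_le ht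
    rw [show (((t + 1 : Nat) : Int)) = (t : Int) + 1 by push_cast; ring,
        PySem.List.pyRange_one_succ_right (by positivity),
        List.foldl_append, ih ht']
    simpa using pv_inner_step m k t hk (by omega)

theorem pvMatP_zero (m k : Nat) : pvMatP m k 0 = pvMat m (k + 1) := by
  unfold pvMatP pvMat
  apply List.map_congr_left
  intro i hi
  by_cases h1 : i < k
  · rw [if_pos h1, if_pos (by omega)]
  · rw [if_neg h1]
    by_cases h2 : i = k
    · subst h2
      rw [if_pos rfl, if_pos (by omega)]
      unfold pvPRow
      have h3 : (List.range m).map (fun j => if j < 0 then pvCell m i j else 0)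
          = (List.range m).map (fun _ => (0 : Int)) :=
        List.map_congr_left (fun j _ => by rw [if_neg (Nat.not_lt_zero j)])
      rw [h3, List.map_const', List.length_range]
    · rw [if_neg h2, if_neg (by omega)]

theorem pvMatP_full (m k : Nat) : pvMatP m k m = pvMat m k := by
  unfold pvMatP pvMat
  apply List.map_congr_left
  intro i hi
  simp only [List.mem_range] at hi
  by_cases h1 : i < k
  · rw [if_pos h1, if_pos h1]
  · rw [if_neg h1, if_neg h1]
    by_cases h2 : i = k
    · subst h2
      rw [if_pos rfl]
      unfold pvPRow pvRow
      apply List.map_congr_left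
      intro j hj
      simp only [List.mem_range] at hj
      rw [if_pos hj]
    · rw [if_neg h2]

-- the outer loop over i = k-1 down to 0
theorem pv_outer (m : Nat) (k : Nat) (hk : k ≤ m) :
    (PySem.List.pyRange ((k : Int) - 1) (-1) (-1)).foldl
      (fun (st : List (List Int) × Int) (i : Int) =>
        (PySem.List.pyRange 0 (m : Int) 1).foldl
          (fun (st : List (List Int) × Int) (j : Int) =>
            if i + j ≥ (m : Int) - 1 then
              (st.1.modify i.toNat (fun row => row.set j.toNat st.2), st.2 + 1)
            else st) st)
      (pvMat m k, pvT m - pvT k + 1)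
    = (pvMat m 0, pvT m + 1) := by
  induction k with
  | zero =>
    rw [PySem.List.pyRange_neg_one_eq_nil (by norm_num)]
    simp [pvT]
  | succ k ih =>
    have hk' : k ≤ m := Nat.le_of_succ_le hk
    rw [show (((k + 1 : Nat) : Int) - 1) = (k : Int) by push_cast; ring,
        PySem.List.pyRange_neg_one_cons (by omega), List.foldl_cons]
    have hstep :
        (PySem.List.pyRange 0 (m : Int) 1).foldl
          (fun (st : List (List Int) × Int) (j : Int) =>
            if (k : Int) + j ≥ (m : Int) - 1 then
              (st.1.modify ((k : Int)).toNat (fun row => row.set j.toNat st.2), st.2 + 1)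
            else st)
          (pvMat m (k + 1), pvT m - pvT (k + 1) + 1)
        = (pvMat m k, pvT m - pvT k + 1) := by
      rw [← pvMatP_zero]
      rw [pv_inner m k (by omega) m le_rfl, pvMatP_full]
      have : pvCnt m k m = (k : Int) + 1 := by unfold pvCnt; omega
      rw [this]
      have : pvT (k + 1) = pvT k + ((k : Int) + 1) := by simp [pvT]
      rw [this]
      refine Prod.ext rfl ?_
      ring
    rw [hstep]
    exact ih hk'

theorem pv_initial (m : Nat) :
    (PySem.List.pyRange 0 (m : Int) 1).map (fun _ => List.replicate m (0 : Int)) = pvMat m m := by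
  rw [PySem.List.pyRange_zero_natCast]
  unfold pvMat
  rw [List.map_map]
  apply List.map_congr_left
  intro i hi
  simp only [List.mem_range] at hi
  simp [hi]

theorem pv_final (m : Nat) : pvMat m 0 = matriz_f_alt (m : Int) := by
  unfold matriz_f_alt pvMat
  rw [PySem.List.pyRange_zero_natCast, List.map_map]
  apply List.map_congr_left
  intro i hi
  simp only [List.mem_range] at hi
  rw [if_neg (by omega)]
  simp only [Function.comp_apply]
  unfold pvRow
  rw [List.map_map]
  apply List.map_congr_left
  intro j hj
  simp only [List.mem_range] at hj
  simp only [Function.comp_apply]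
  unfold pvCell
  by_cases hcond : (i : Int) + (j : Int) ≥ (m : Int) - 1
  · rw [if_pos hcond, if_pos hcond]
    have h2 : (0 : Int) < 2 := by norm_num
    rw [PySem.Int.floordiv_eq_ediv_of_pos h2, PySem.Int.floordiv_eq_ediv_of_pos h2]
    have e1 : 2 * pvT m = (m : Int) * ((m : Int) + 1) := pvT_eq m
    have e2 : 2 * pvT (i + 1) = ((i : Int) + 1) * ((i : Int) + 2) := by
      rw [pvT_eq (i + 1)]; push_cast; ring
    omega
  · rw [if_neg hcond, if_neg hcond]

-- ===== VERDICT (by name: the statement is the Claim_ definition above) =====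
theorem matriz_f_spec : Claim_equal_matriz_f := by
  intro n _hDom hPre
  unfold Spec_matriz_f matriz_f
  have hn : n = ((n.toNat : Nat) : Int) := by
    have : 0 < n := hPre
    omega
  set m := n.toNat with hm
  rw [hn]
  rw [pv_initial m]
  have h1 : pvT m - pvT m + 1 = 1 := by ring
  have := pv_outer m m le_rfl
  rw [h1] at this
  rw [this]
  exact pv_final m
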